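-- pv_equiv track=rewrite | github.com/dbgnvan2/trans-summary | transcript_to_pdf.py | sort_key_term_sections
-- ===== SOURCE A (Python) =====
-- def sort_key_term_sections(content: str) -> str:
--     """Sort key term sections alphabetically by heading."""
--     sections = []
--     current = None
--     for line in content.splitlines():
--         if line.startswith('## '):
--             if current:
--                 sections.append(current)
--             current = {'title': line[3:].strip(), 'lines': [line]}
--         else:
--             if current is None:
--                 # Skip any leading content without a heading
--                 continue
--             current['lines'].append(line)
--     if current:
--         sections.append(current)
--
--     if not sections:
--         return content
--
--     sections.sort(key=lambda s: s['title'].lower())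
--     return '\n'.join('\n'.join(section['lines']) for section in sections).strip()
-- ===== SOURCE B (Python) =====
-- def sort_key_term_sections(content: str) -> str:
--     """Sort key term sections alphabetically by heading."""
--     lines = content.splitlines()
--     n = len(lines)
--     secs = []
--     i = 0
--     while i < n:
--         if lines[i].startswith('## '):
--             j = i + 1
--             while j < n and not lines[j].startswith('## '):
--                 j += 1
--             secs.append((lines[i][3:].strip(), lines[i:j]))
--             i = j
--         else:
--             i += 1
--     if not secs:
--         return content
--     secs.sort(key=lambda s: s[0].lower())
--     return '\n'.join('\n'.join(body) for _, body in secs).strip()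
-- ===== Notes on version B (the rewrite author's own statement) =====
-- stated objective: alternative
-- what changed: Replaces the accumulator loop that grows a mutable in-progress section dict line by line with an index scan that finds each heading and slices the whole section (heading line through the line before the next heading) in one step; sections are (title, slice) pairs sorted and joined as in A.
import Mathlib
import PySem

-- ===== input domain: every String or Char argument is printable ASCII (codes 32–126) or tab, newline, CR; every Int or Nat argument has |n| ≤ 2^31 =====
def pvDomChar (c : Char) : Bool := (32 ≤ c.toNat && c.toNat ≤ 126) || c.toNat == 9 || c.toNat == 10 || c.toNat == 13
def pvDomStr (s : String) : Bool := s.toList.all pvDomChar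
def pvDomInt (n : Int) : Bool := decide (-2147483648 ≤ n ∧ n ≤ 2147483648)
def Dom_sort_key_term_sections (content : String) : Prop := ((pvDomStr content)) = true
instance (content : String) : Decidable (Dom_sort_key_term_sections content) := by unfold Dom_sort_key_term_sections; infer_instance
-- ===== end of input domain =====

-- B replaces A's accumulator loop (in-progress section dict) with an index scan that slices each
-- whole section at once; same cost, different decomposition ('alternative'). Return value only.

-- ===== PORT A =====
-- shared tiny helpers: 'line.startswith("## ")' and 'line[3:].strip()'
def pvIsH (l : String) : Bool := PySem.Str.startswith l "## "
def pvTitle (l : String) : String := PySem.Str.strip (PySem.Str.slice l (some 3) none)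

-- A's loop state: (sections so far, current section or None); section = (title, lines)
def pvStepA (st : List (String × List String) × Option (String × List String)) (line : String) :
    List (String × List String) × Option (String × List String) :=
  if pvIsH line then
    ((match st.2 with | some c => st.1 ++ [c] | none => st.1), some (pvTitle line, [line]))
  else
    match st.2 with
    | none => st
    | some c => (st.1, some (c.1, c.2 ++ [line]))

-- 'if current: sections.append(current)' after the loop
def pvFlush (st : List (String × List String) × Option (String × List String)) :
    List (String × List String) :=
  match st.2 with | some c => st.1 ++ [c] | none => st.1

def sort_key_term_sections (content : String) : String :=
  let sections := pvFlush ((PySem.Str.splitlines content).foldl pvStepA ([], none))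
  if sections.isEmpty then content
  else
    PySem.Str.strip (PySem.Str.join "\n"
      ((PySem.List.sorted sections (fun s => (PySem.Str.lower s.1).toList) false).map
        (fun sec => PySem.Str.join "\n" sec.2)))

-- ===== PORT B =====
-- Source B's outer while loop over the remaining lines; the inner 'while j < n and not heading'
-- scan plus the slice lines[i:j] is takeWhile/dropWhile on the suffix after the heading.
def pvScanB : List String → List (String × List String)
  | [] => []
  | l :: ls =>
    if pvIsH l then
      (pvTitle l, l :: ls.takeWhile (fun x => !pvIsH x)) ::
        pvScanB (ls.dropWhile (fun x => !pvIsH x))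
    else pvScanB ls
termination_by ls => ls.length
decreasing_by
  · simpa using Nat.lt_succ_of_le (List.length_dropWhile_le _ _)
  · simp

def sort_key_term_sections_alt (content : String) : String :=
  let secs := pvScanB (PySem.Str.splitlines content)
  if secs.isEmpty then content
  else
    PySem.Str.strip (PySem.Str.join "\n"
      ((PySem.List.sorted secs (fun s => (PySem.Str.lower s.1).toList) false).map
        (fun sec => PySem.Str.join "\n" sec.2)))

-- ===== PRECONDITION & SPEC =====
def Spec_sort_key_term_sections (content : String) (out : String) : Prop := out = sort_key_term_sections_alt content
instance (content : String) (out : String) : Decidable (Spec_sort_key_term_sections content out) := by unfold Spec_sort_key_term_sections; infer_instance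

-- ===== CLAIM (what is proved, stated in full; the proofs are below) =====
def Claim_equal_sort_key_term_sections : Prop := ∀ (content : String), Dom_sort_key_term_sections content → Spec_sort_key_term_sections content (sort_key_term_sections content)

-- ===== LEMMAS AND PROOFS =====

-- Invariant for A's loop while a section is open: it closes the open section with all
-- non-heading lines that follow, then behaves like B's scan from the next heading on.
theorem pvFoldA_some (ls : List String) :
    ∀ (secs : List (String × List String)) (t : String) (b : List String),
    pvFlush (ls.foldl pvStepA (secs, some (t, b))) =
      secs ++ (t, b ++ ls.takeWhile (fun x => !pvIsH x)) ::
        pvScanB (ls.dropWhile (fun x => !pvIsH x)) := by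
  induction ls with
  | nil => intro secs t b; simp [pvFlush, pvScanB]
  | cons l ls ih =>
    intro secs t b
    by_cases h : pvIsH l = true
    · simp only [List.foldl_cons, pvStepA, h, List.takeWhile_cons, List.dropWhile_cons,
        Bool.not_true, Bool.false_eq_true, if_true, if_false]
      rw [ih]
      simp [pvScanB, h]
    · simp only [List.foldl_cons, pvStepA, h, List.takeWhile_cons, List.dropWhile_cons,
        Bool.not_false, if_true, if_false, Bool.false_eq_true]
      rw [ih]
      simp [List.append_assoc]

-- From the initial state, A's loop builds exactly B's section list.
theorem pvFoldA_none (ls : List String) :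
    pvFlush (ls.foldl pvStepA ([], none)) = pvScanB ls := by
  induction ls with
  | nil => simp [pvFlush, pvScanB]
  | cons l ls ih =>
    by_cases h : pvIsH l = true
    · simp only [List.foldl_cons, pvStepA, h, if_true]
      rw [pvFoldA_some]
      simp [pvScanB, h]
    · simp only [List.foldl_cons, pvStepA, h, Bool.false_eq_true, if_false]
      rw [ih]
      simp [pvScanB, h]

-- ===== VERDICT (by name: the statement is the Claim_ definition above) =====
theorem sort_key_term_sections_spec : Claim_equal_sort_key_term_sections := by
  intro content _
  unfold Spec_sort_key_term_sections sort_key_term_sections sort_key_term_sections_alt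
  rw [pvFoldA_none]
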